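-- pv_equiv track=rewrite | github.com/Casafred/patent-workbench | backend/utils/glm_ocr_utils.py | split_merged_numbers
-- ===== SOURCE A (Python) =====
-- from typing import List, Dict, Optional
--
-- def split_merged_numbers(text: str, max_length: int = 4) -> List[str]:
--     """
--     Attempt to split merged numbers (e.g., "102300" -> ["102", "300"]).
--
--     GLM Handwriting OCR sometimes merges adjacent numbers.
--     This function attempts to split them based on common patent marker patterns.
--
--     Args:
--         text: Merged text string
--         max_length: Maximum length for a single marker
--
--     Returns:
--         List of potential split markers
--     """
--     if len(text) <= max_length:
--         return [text]
--
--     results = []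
--
--     for i in range(1, len(text)):
--         left = text[:i]
--         right = text[i:]
--
--         if len(left) <= max_length and len(right) <= max_length:
--             if left and right:
--                 results.append(left)
--                 results.append(right)
--                 break
--
--     if not results:
--         results = [text]
--
--     return results
-- ===== SOURCE B (Python) =====
-- def split_merged_numbers(text: str, max_length: int = 4):
--     n = len(text)
--     if n <= max_length:
--         return [text]
--     i = n - max_length
--     if i <= max_length:
--         return [text[:i], text[i:]]
--     return [text]
-- ===== Notes on version B (the rewrite author's own statement) =====
-- stated objective: faster
-- what changed: Replaces the linear scan for the first index where both halves fit with the closed-form index len(text)-max_length (the smallest such index), turning the O(n) search loop with per-step slicing into O(1) arithmetic plus a single slice.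
import Mathlib
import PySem

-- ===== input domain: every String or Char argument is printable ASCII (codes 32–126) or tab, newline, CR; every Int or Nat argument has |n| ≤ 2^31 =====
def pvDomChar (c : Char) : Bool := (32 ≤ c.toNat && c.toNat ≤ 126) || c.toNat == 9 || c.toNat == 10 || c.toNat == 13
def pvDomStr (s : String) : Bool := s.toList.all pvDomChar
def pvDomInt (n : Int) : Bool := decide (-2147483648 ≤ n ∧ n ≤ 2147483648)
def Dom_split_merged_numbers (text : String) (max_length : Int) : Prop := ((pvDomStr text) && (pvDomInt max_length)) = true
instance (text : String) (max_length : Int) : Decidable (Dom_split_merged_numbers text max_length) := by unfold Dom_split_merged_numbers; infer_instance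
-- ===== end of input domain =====

-- B replaces A's linear search for the first valid split point with the closed-form index
-- len(text) - max_length (measured faster; same return value on every input).


-- ===== PORT A =====
-- the 'for i in range(1, len(text)): … break' loop of A: first i whose two slices both fit
def splitLoopA (cs : List Char) (maxLen : Int) : List Int → List String
  | [] => []
  | i :: rest =>
      let left := PySem.List.slice cs none (some i)
      let right := PySem.List.slice cs (some i) none
      if (left.length : Int) ≤ maxLen ∧ (right.length : Int) ≤ maxLen then
        if left ≠ [] ∧ right ≠ [] then
          [String.ofList left, String.ofList right]
        else splitLoopA cs maxLen rest
      else splitLoopA cs maxLen rest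

def split_merged_numbers (text : String) (max_length : Int) : List String :=
  let cs := text.toList
  if (cs.length : Int) ≤ max_length then [text]
  else
    let results := splitLoopA cs max_length (PySem.List.pyRange 1 (cs.length : Int) 1)
    if results = [] then [text] else results

-- ===== PORT B =====
def split_merged_numbers_alt (text : String) (max_length : Int) : List String :=
  let cs := text.toList
  let n : Int := cs.length
  if n ≤ max_length then [text]
  else
    let i := n - max_length
    if i ≤ max_length then
      [String.ofList (PySem.List.slice cs none (some i)),
       String.ofList (PySem.List.slice cs (some i) none)]
    else [text]

-- ===== PRECONDITION & SPEC =====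
def Spec_split_merged_numbers (text : String) (max_length : Int) (out : List String) : Prop := out = split_merged_numbers_alt text max_length
instance (text : String) (max_length : Int) (out : List String) : Decidable (Spec_split_merged_numbers text max_length out) := by unfold Spec_split_merged_numbers; infer_instance

-- ===== CLAIM (what is proved, stated in full; the proofs are below) =====
def Claim_equal_split_merged_numbers : Prop := ∀ (text : String) (max_length : Int), Dom_split_merged_numbers text max_length → Spec_split_merged_numbers text max_length (split_merged_numbers text max_length)

-- ===== LEMMAS AND PROOFS =====

-- once every remaining index exceeds maxLen, the loop finds nothing
theorem splitLoopA_tail_nil (cs : List Char) (maxLen a : Int)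
    (ha : maxLen < a) (h1 : 1 ≤ a) :
    splitLoopA cs maxLen (PySem.List.pyRange a (cs.length : Int) 1) = [] := by
  by_cases hlt : a < (cs.length : Int)
  · rw [PySem.List.pyRange_one_cons hlt, splitLoopA]
    have hlen : ((PySem.List.slice cs none (some a)).length : Int) = a := by
      rw [PySem.List.slice_to cs (by omega : (0:Int) ≤ a)]
      simp [List.length_take]
      omega
    have hcond : ¬ (((PySem.List.slice cs none (some a)).length : Int) ≤ maxLen ∧
        ((PySem.List.slice cs (some a) none).length : Int) ≤ maxLen) := by
      intro ⟨h1, _⟩; omega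
    rw [if_neg hcond]
    exact splitLoopA_tail_nil cs maxLen (a + 1) (by omega) (by omega)
  · rw [PySem.List.pyRange_one_eq_nil (by omega)]
    rfl
termination_by ((cs.length : Int) - a).toNat
decreasing_by omega

-- main loop characterisation: from any start a with 1 ≤ a ≤ n - maxLen, the first valid
-- split index is n - maxLen (when it fits), else there is none
theorem splitLoopA_char (cs : List Char) (maxLen a : Int) (hm1 : 1 ≤ maxLen)
    (hmax : maxLen < (cs.length : Int)) (h1 : 1 ≤ a) (h2 : a ≤ (cs.length : Int) - maxLen) :
    splitLoopA cs maxLen (PySem.List.pyRange a (cs.length : Int) 1) =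
      if (cs.length : Int) - maxLen ≤ maxLen then
        [String.ofList (PySem.List.slice cs none (some ((cs.length : Int) - maxLen))),
         String.ofList (PySem.List.slice cs (some ((cs.length : Int) - maxLen)) none)]
      else [] := by
  have hn : (0:Int) ≤ (cs.length : Int) := by positivity
  have hlt : a < (cs.length : Int) := by omega
  rw [PySem.List.pyRange_one_cons hlt, splitLoopA]
  have hleft : ((PySem.List.slice cs none (some a)).length : Int) = a := by
    rw [PySem.List.slice_to cs (by omega : (0:Int) ≤ a)]
    simp [List.length_take]
    omega
  have hright : ((PySem.List.slice cs (some a) none).length : Int) = (cs.length : Int) - a := by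
    rw [PySem.List.slice_from cs (by omega : (0:Int) ≤ a)]
    simp [List.length_drop]
    omega
  by_cases heq : a = (cs.length : Int) - maxLen
  · -- at the candidate index the right half fits; the left fits iff n - maxLen ≤ maxLen
    by_cases hfit : (cs.length : Int) - maxLen ≤ maxLen
    · have hcond : (((PySem.List.slice cs none (some a)).length : Int) ≤ maxLen ∧
          ((PySem.List.slice cs (some a) none).length : Int) ≤ maxLen) := by
        constructor <;> omega
      rw [if_pos hcond]
      have hl : PySem.List.slice cs none (some a) ≠ [] := by
        intro h; rw [h] at hleft; simp at hleft; omega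
      have hr : PySem.List.slice cs (some a) none ≠ [] := by
        intro h; rw [h] at hright; simp at hright; omega
      rw [if_pos ⟨hl, hr⟩, if_pos hfit, heq]
    · have hcond : ¬ (((PySem.List.slice cs none (some a)).length : Int) ≤ maxLen ∧
          ((PySem.List.slice cs (some a) none).length : Int) ≤ maxLen) := by
        intro ⟨hc1, _⟩; omega
      rw [if_neg hcond, if_neg hfit]
      exact splitLoopA_tail_nil cs maxLen (a + 1) (by omega) (by omega)
  · -- a < n - maxLen: the right half is still too long, keep scanning
    have hcond : ¬ (((PySem.List.slice cs none (some a)).length : Int) ≤ maxLen ∧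
        ((PySem.List.slice cs (some a) none).length : Int) ≤ maxLen) := by
      intro ⟨_, hc2⟩; omega
    rw [if_neg hcond]
    exact splitLoopA_char cs maxLen (a + 1) hm1 hmax (by omega) (by omega)
termination_by ((cs.length : Int) - a).toNat
decreasing_by omega

-- ===== VERDICT (by name: the statement is the Claim_ definition above) =====
theorem split_merged_numbers_spec : Claim_equal_split_merged_numbers := by
  intro text max_length _
  unfold Spec_split_merged_numbers split_merged_numbers split_merged_numbers_alt
  set cs := text.toList with hcs
  by_cases hshort : (cs.length : Int) ≤ max_length
  · simp [hshort]
  · have hmax : max_length < (cs.length : Int) := by omega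
    rw [if_neg hshort, if_neg hshort]
    by_cases hm1 : 1 ≤ max_length
    · rw [splitLoopA_char cs max_length 1 hm1 hmax le_rfl (by omega)]
      by_cases hfit : (cs.length : Int) - max_length ≤ max_length
      · simp [hfit]
      · simp [hfit]
    · rw [splitLoopA_tail_nil cs max_length 1 (by omega) le_rfl]
      rw [if_neg (by omega : ¬ (cs.length : Int) - max_length ≤ max_length)]
      simp
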